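-- pv_equiv track=rewrite | github.com/thejacobexpress/MeetingChauffeur | AWS Lambdas NOT INCLUDED IN ACTUAL PROJECT/SendEmails.py | createHTMLEmailStructure
-- ===== SOURCE A (Python) =====
-- def createHTMLEmailStructure(data):
--     content = "<p><strong>Hello from McKeeAI!</strong><br><br> Here are some insights about your meeting:<br><br></p>"
--     for(key, value) in data.items():
--         newValue = ""
--         for index, char in enumerate(value):
--             if index == len(value)-1:
--                 newValue += char
--                 break
--             if(value[index+1].isdigit() and key != "date_time" and key != "location"):
--                 newValue += "<br>"
--             newValue += value[index]
--         content += ("<p><strong>" + key.capitalize() + "</strong></p><p>" + newValue + "</p>" if key != "date_time" and key != "next_steps" else "<p><strong>" + key.replace("_", " ").title() + "</strong></p><p>" + newValue + "</p>")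
--     content += "<p><br><br>Thank you for using McKeeAI!</p>"
--     return content
-- ===== SOURCE B (Python) =====
-- def createHTMLEmailStructure(data):
--     head = "<p><strong>Hello from McKeeAI!</strong><br><br> Here are some insights about your meeting:<br><br></p>"
--     tail = "<p><br><br>Thank you for using McKeeAI!</p>"
--
--     def section(key, value):
--         if key in ("date_time", "location"):
--             body = value
--         else:
--             # split-and-join: cut the value before every character that is
--             # followed by a digit, then glue the pieces with "<br>"
--             cuts = [i for i in range(len(value) - 1) if value[i + 1].isdigit()]
--             bounds = [0] + cuts + [len(value)]
--             body = "<br>".join(value[a:b] for a, b in zip(bounds, bounds[1:]))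
--         heading = key.replace("_", " ").title() if key in ("date_time", "next_steps") else key.capitalize()
--         return "<p><strong>" + heading + "</strong></p><p>" + body + "</p>"
--
--     return head + "".join(section(k, v) for k, v in data.items()) + tail
-- ===== Notes on version B (the rewrite author's own statement) =====
-- stated objective: alternative
-- what changed: Replaces A's look-ahead character loop (index arithmetic with a break on the last index, appending '<br>' before digit-preceded characters one char at a time) by a split-and-join algorithm: compute the cut positions, slice the value at those bounds, and glue the slices with '<br>'.join; the page is assembled from section strings instead of a growing accumulator.
import Mathlib
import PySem

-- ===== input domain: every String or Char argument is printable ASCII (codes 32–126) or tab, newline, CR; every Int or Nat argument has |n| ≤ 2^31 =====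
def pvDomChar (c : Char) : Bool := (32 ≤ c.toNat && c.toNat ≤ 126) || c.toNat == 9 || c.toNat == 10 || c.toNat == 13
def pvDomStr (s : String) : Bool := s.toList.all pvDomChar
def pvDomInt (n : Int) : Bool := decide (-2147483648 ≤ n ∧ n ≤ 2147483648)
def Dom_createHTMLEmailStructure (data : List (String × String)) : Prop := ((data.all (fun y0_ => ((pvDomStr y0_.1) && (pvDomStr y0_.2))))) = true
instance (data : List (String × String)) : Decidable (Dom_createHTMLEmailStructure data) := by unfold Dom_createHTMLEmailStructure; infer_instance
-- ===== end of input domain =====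

-- B replaces A's look-ahead character loop by a split-and-join algorithm: compute the
-- cut positions, slice the value at them, and glue the pieces with "<br>" (objective: alternative).


-- shared ports of str.capitalize() / str.title() (exact on the ASCII domain, where
-- 'cased' = isalpha); both Pythons call them identically on the headings.
def pyCapitalize (cs : List Char) : List Char :=
  match cs with
  | [] => []
  | c :: rest => PySem.Chars.upperChar c :: rest.map PySem.Chars.lowerChar

def pyTitleGo (prevAlpha : Bool) (cs : List Char) : List Char :=
  match cs with
  | [] => []
  | c :: rest =>
    (if PySem.Chars.isalpha c then
       (if prevAlpha then PySem.Chars.lowerChar c else PySem.Chars.upperChar c)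
     else c) :: pyTitleGo (PySem.Chars.isalpha c) rest

def pyTitle (cs : List Char) : List Char := pyTitleGo false cs

-- ===== PORT A =====
-- A's inner 'for index, char in enumerate(value)' loop with its break;
-- 'char' IS value[index] here, so the final '+= value[index]' appends the current char.
def aInner (key : String) (v : List Char) (idx : Int) (chars : List Char) (acc : List Char) : List Char :=
  match chars with
  | [] => acc
  | c :: rest =>
    if idx == (v.length : Int) - 1 then acc ++ [c]
    else
      let acc := if PySem.Chars.isdigit (PySem.List.pyGetD v (idx + 1) ' ')
                    && !(key == "date_time") && !(key == "location")
                 then acc ++ "<br>".toList else acc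
      aInner key v (idx + 1) rest (acc ++ [c])

def createHTMLEmailStructure (data : List (String × String)) : String :=
  let content := "<p><strong>Hello from McKeeAI!</strong><br><br> Here are some insights about your meeting:<br><br></p>".toList
  let content := data.foldl (fun content kv =>
    let key := kv.1
    let value := kv.2.toList
    let newValue := aInner key value 0 value []
    content ++
      (if !(key == "date_time") && !(key == "next_steps") then
        "<p><strong>".toList ++ pyCapitalize key.toList ++ "</strong></p><p>".toList ++ newValue ++ "</p>".toList
      else
        "<p><strong>".toList ++ pyTitle (PySem.Chars.replace key.toList "_".toList " ".toList) ++ "</strong></p><p>".toList ++ newValue ++ "</p>".toList)) content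
  String.ofList (content ++ "<p><br><br>Thank you for using McKeeAI!</p>".toList)

-- ===== PORT B =====
-- the split-and-join: cut positions, bounds list, slices glued with "<br>"
def bBody (v : List Char) : List Char :=
  let cuts := (PySem.List.pyRange 0 ((v.length : Int) - 1) 1).filter
                (fun i => PySem.Chars.isdigit (PySem.List.pyGetD v (i + 1) ' '))
  let bounds := [(0 : Int)] ++ cuts ++ [(v.length : Int)]
  PySem.Chars.join "<br>".toList
    ((bounds.zip bounds.tail).map (fun ab => PySem.List.slice v (some ab.1) (some ab.2)))

def bPiece (kv : String × String) : List Char :=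
  let key := kv.1
  let value := kv.2.toList
  let body := if key == "date_time" || key == "location" then value else bBody value
  let heading := if key == "date_time" || key == "next_steps" then
                   pyTitle (PySem.Chars.replace key.toList "_".toList " ".toList)
                 else pyCapitalize key.toList
  "<p><strong>".toList ++ heading ++ "</strong></p><p>".toList ++ body ++ "</p>".toList

def createHTMLEmailStructure_alt (data : List (String × String)) : String :=
  String.ofList
    ("<p><strong>Hello from McKeeAI!</strong><br><br> Here are some insights about your meeting:<br><br></p>".toList
      ++ PySem.Chars.join [] (data.map bPiece)
      ++ "<p><br><br>Thank you for using McKeeAI!</p>".toList)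

-- ===== PRECONDITION & SPEC =====
def Spec_createHTMLEmailStructure (data : List (String × String)) (out : String) : Prop := out = createHTMLEmailStructure_alt data
instance (data : List (String × String)) (out : String) : Decidable (Spec_createHTMLEmailStructure data out) := by unfold Spec_createHTMLEmailStructure; infer_instance

-- ===== CLAIM (what is proved, stated in full; the proofs are below) =====
def Claim_equal_createHTMLEmailStructure : Prop := ∀ (data : List (String × String)), Dom_createHTMLEmailStructure data → Spec_createHTMLEmailStructure data (createHTMLEmailStructure data)

-- ===== LEMMAS AND PROOFS =====

-- common shape of the per-value rendering: '<br>' before char idx iff b and value[idx+1] is a digit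
def specInner (b : Bool) (v : List Char) (idx : Int) (chars : List Char) : List Char :=
  match chars with
  | [] => []
  | c :: rest =>
    (if b && decide (idx + 1 < (v.length : Int))
          && PySem.Chars.isdigit (PySem.List.pyGetD v (idx + 1) ' ')
     then "<br>".toList else []) ++ [c] ++ specInner b v (idx + 1) rest

theorem aInner_eq_spec (key : String) (v : List Char) :
    ∀ (chars : List Char) (idx : Int) (acc : List Char),
      idx + chars.length = (v.length : Int) →
      aInner key v idx chars acc =
        acc ++ specInner (!(key == "date_time") && !(key == "location")) v idx chars := by
  intro chars
  induction chars with
  | nil => intro idx acc _; simp [aInner, specInner]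
  | cons c rest ih =>
    intro idx acc h
    simp only [List.length_cons] at h
    by_cases hl : rest = []
    · subst hl
      have : idx = (v.length : Int) - 1 := by simp at h; omega
      simp [aInner, specInner, this]
    · have hr : (0 : Int) < rest.length := by exact_mod_cast List.length_pos_iff.mpr hl
      have hne : idx ≠ (v.length : Int) - 1 := by push_cast at h; omega
      have hlt : idx + 1 < (v.length : Int) := by push_cast at h; omega
      rw [aInner, specInner]
      rw [if_neg (by simpa using hne)]
      simp only [hlt, decide_true]
      rw [ih (idx + 1) _ (by push_cast at h ⊢; omega)]
      by_cases h1 : key = "date_time" <;> by_cases h2 : key = "location" <;>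
        rcases Bool.eq_false_or_eq_true
          (PySem.Chars.isdigit (PySem.List.pyGetD v (idx + 1) ' ')) with hd | hd <;>
        simp [h1, h2, hd]

theorem specInner_false (v : List Char) :
    ∀ (chars : List Char) (idx : Int), specInner false v idx chars = chars := by
  intro chars
  induction chars with
  | nil => intro idx; simp [specInner]
  | cons c rest ih => intro idx; simp [specInner, ih]

theorem join_nil_flatten (xs : List (List Char)) : PySem.Chars.join [] xs = xs.flatten := by
  induction xs with
  | nil => rfl
  | cons x rest ih =>
    cases rest with
    | nil => simp [PySem.Chars.join, List.intercalate]
    | cons y r =>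
      simp only [PySem.Chars.join, List.intercalate, List.intersperse] at ih ⊢
      simp [ih]

-- the Nat-indexed cut list of a value, and the insertion normal form both sides are reduced to
def dCuts (v : List Char) : List Nat :=
  (List.range (v.length - 1)).filter
    (fun i => PySem.Chars.isdigit (PySem.List.pyGetD v ((i : Int) + 1) ' '))

def insFrom (cs : List Nat) : Nat → List Char → List Char
  | _, [] => []
  | i, c :: rest => (if cs.contains i then "<br>".toList else []) ++ c :: insFrom cs (i + 1) rest

theorem insFrom_nil : ∀ (i : Nat) (chars : List Char), insFrom [] i chars = chars := by
  intro i chars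
  induction chars generalizing i with
  | nil => rfl
  | cons c rest ih => simp [insFrom, ih]

theorem insFrom_cons_gt (c : Nat) (cs : List Nat) :
    ∀ (chars : List Char) (i : Nat), c < i → insFrom (c :: cs) i chars = insFrom cs i chars := by
  intro chars
  induction chars with
  | nil => intro i _; rfl
  | cons x rest ih =>
    intro i h
    have h2 : ((c :: cs).contains i) = cs.contains i := by
      simp only [List.contains_cons]
      have hne : (i == c) = false := by simp; omega
      rw [hne, Bool.false_or]
    rw [insFrom, insFrom, h2, ih _ (by omega)]

-- A's form equals the insertion normal form
theorem specInner_eq_insFrom (v : List Char) :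
    ∀ (chars : List Char) (i : Nat),
      specInner true v (i : Int) chars = insFrom (dCuts v) i chars := by
  intro chars
  induction chars with
  | nil => intro i; rfl
  | cons c rest ih =>
    intro i
    have hc : (dCuts v).contains i
        = (decide ((i : Int) + 1 < (v.length : Int))
            && PySem.Chars.isdigit (PySem.List.pyGetD v ((i : Int) + 1) ' ')) := by
      by_cases hd : PySem.Chars.isdigit (PySem.List.pyGetD v ((i : Int) + 1) ' ') = true
      · by_cases hi : (i : Int) + 1 < (v.length : Int)
        · have hi' : i < v.length - 1 := by omega
          simp [dCuts, List.mem_filter, List.mem_range, hd, hi, hi']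
        · have hi' : ¬ i < v.length - 1 := by omega
          simp [dCuts, List.mem_filter, List.mem_range, hd, hi, hi']
      · simp [dCuts, List.mem_filter, List.mem_range, hd]
    rw [specInner, insFrom, hc]
    have hcast : ((i : Int) + 1) = (((i + 1 : Nat)) : Int) := by push_cast; ring
    rw [hcast, ih]
    simp

-- B's segments-join over Nat bounds
def segJoin (v : List Char) (bs : List Nat) : List Char :=
  PySem.Chars.join "<br>".toList
    ((bs.zip bs.tail).map (fun ab => (v.drop ab.1).take (ab.2 - ab.1)))

theorem join_cons_of_ne_nil (sep x : List Char) (ys : List (List Char)) (h : ys ≠ []) :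
    PySem.Chars.join sep (x :: ys) = x ++ sep ++ PySem.Chars.join sep ys := by
  cases ys with
  | nil => exact absurd rfl h
  | cons y ys' => exact PySem.Chars.join_cons_cons sep x y ys'

theorem insFrom_step (v : List Char) (c : Nat) (cs' : List Nat)
    (hcn : c < v.length) (hgt : ∀ x ∈ cs', c < x) :
    ∀ (k a : Nat), a + k = c →
      insFrom (c :: cs') a (v.drop a)
        = (v.drop a).take (c - a) ++ "<br>".toList ++ insFrom cs' c (v.drop c) := by
  intro k
  induction k with
  | zero =>
    intro a h
    have hac : a = c := by omega
    subst hac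
    have hnotmem : a ∉ cs' := fun hm => absurd (hgt a hm) (lt_irrefl a)
    rw [List.drop_eq_getElem_cons hcn]
    rw [insFrom, insFrom]
    have h1 : (a :: cs').contains a = true := by simp
    have h2 : cs'.contains a = false := by simp [hnotmem]
    rw [h1, h2, insFrom_cons_gt a cs' _ (a + 1) (by omega)]
    simp
  | succ k ih =>
    intro a h
    have han : a < v.length := by omega
    have hnotmem : (c :: cs').contains a = false := by
      simp only [List.contains_cons]
      have : a ∉ cs' := fun hm => by have := hgt a hm; omega
      simp [this]
      omega
    rw [List.drop_eq_getElem_cons han, insFrom, hnotmem]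
    rw [ih (a + 1) (by omega)]
    have hta : c - a = (c - (a + 1)) + 1 := by omega
    rw [hta, List.take_succ_cons]
    simp

theorem segJoin_eq_insFrom (v : List Char) :
    ∀ (cs : List Nat) (a : Nat), a ≤ v.length → (∀ x ∈ cs, a ≤ x ∧ x < v.length) →
      cs.Pairwise (· < ·) →
      segJoin v (a :: cs ++ [v.length]) = insFrom cs a (v.drop a) := by
  intro cs
  induction cs with
  | nil =>
    intro a ha _ _
    have hlen : (v.drop a).take (v.length - a) = v.drop a :=
      List.take_of_length_le (by simp)
    simp [segJoin, insFrom_nil, PySem.Chars.join_singleton, hlen]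
  | cons c cs' ih =>
    intro a ha hmem hpw
    obtain ⟨hac, hcn⟩ := hmem c (by simp)
    have hgt : ∀ x ∈ cs', c < x := (List.pairwise_cons.mp hpw).1
    have hzip_ne : ((c :: cs' ++ [v.length]).zip (cs' ++ [v.length])).map
        (fun ab => (v.drop ab.1).take (ab.2 - ab.1)) ≠ [] := by
      have : (cs' ++ [v.length]) ≠ [] := by simp
      cases h : cs' ++ [v.length] with
      | nil => exact absurd h this
      | cons b bs => simp [h, List.zip]
    have hstep : segJoin v (a :: c :: cs' ++ [v.length])
        = (v.drop a).take (c - a) ++ "<br>".toList ++ segJoin v (c :: cs' ++ [v.length]) := by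
      unfold segJoin
      rw [show ((a :: c :: cs' ++ [v.length]).zip (a :: c :: cs' ++ [v.length]).tail)
            = (a, c) :: ((c :: cs' ++ [v.length]).zip (cs' ++ [v.length])) from rfl]
      rw [List.map_cons]
      rw [join_cons_of_ne_nil _ _ _ hzip_ne]
      rfl
    rw [hstep, ih c (by omega) (fun x hx => ⟨le_of_lt (hgt x hx), (hmem x (by simp [hx])).2⟩)
          (List.pairwise_cons.mp hpw).2]
    rw [insFrom_step v c cs' hcn hgt (c - a) a (by omega)]

theorem bBody_eq_spec (v : List Char) : bBody v = specInner true v 0 v := by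
  have hrange : PySem.List.pyRange 0 ((v.length : Int) - 1) 1
      = (List.range (v.length - 1)).map (fun k : Nat => (k : Int)) := by
    rw [PySem.List.pyRange_one]
    have : (((v.length : Int) - 1) - 0).toNat = v.length - 1 := by omega
    rw [this]
    exact List.map_congr_left (fun k _ => by omega)
  have hcuts : (PySem.List.pyRange 0 ((v.length : Int) - 1) 1).filter
        (fun i => PySem.Chars.isdigit (PySem.List.pyGetD v (i + 1) ' '))
      = (dCuts v).map (fun k : Nat => (k : Int)) := by
    rw [hrange, List.filter_map]
    rfl
  have hseg : bBody v = segJoin v (0 :: dCuts v ++ [v.length]) := by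
    dsimp only [bBody, segJoin]
    rw [hcuts]
    have hb : ([(0 : Int)] ++ (dCuts v).map (fun k : Nat => (k : Int)) ++ [(v.length : Int)])
        = (0 :: (dCuts v ++ [v.length])).map (fun k : Nat => (k : Int)) := by
      simp
    rw [hb]
    rw [show ((0 :: (dCuts v ++ [v.length])).map (fun k : Nat => (k : Int))).tail
          = (dCuts v ++ [v.length]).map (fun k : Nat => (k : Int)) from rfl]
    rw [show (0 :: dCuts v ++ [v.length]).tail = dCuts v ++ [v.length] from rfl]
    rw [show (0 :: dCuts v ++ [v.length]) = (0 :: (dCuts v ++ [v.length])) from rfl]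
    rw [List.zip_map, List.map_map]
    congr 1
    apply List.map_congr_left
    intro ab _
    simp [Prod.map, PySem.List.slice_natCast]
  rw [hseg, segJoin_eq_insFrom v (dCuts v) 0 (by omega)
        (fun x hx => by
          have : x ∈ List.range (v.length - 1) := List.mem_of_mem_filter hx
          have := List.mem_range.mp this
          omega)
        ((List.pairwise_lt_range).filter _)]
  rw [List.drop_zero]
  have := specInner_eq_insFrom v v 0
  simpa using this.symm

theorem piece_eq (kv : String × String) :
    (let key := kv.1
     let value := kv.2.toList
     let newValue := aInner key value 0 value []
     (if !(key == "date_time") && !(key == "next_steps") then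
        "<p><strong>".toList ++ pyCapitalize key.toList ++ "</strong></p><p>".toList ++ newValue ++ "</p>".toList
      else
        "<p><strong>".toList ++ pyTitle (PySem.Chars.replace key.toList "_".toList " ".toList) ++ "</strong></p><p>".toList ++ newValue ++ "</p>".toList))
    = bPiece kv := by
  obtain ⟨key, value⟩ := kv
  have ha := aInner_eq_spec key value.toList value.toList 0 [] (by simp)
  by_cases h1 : key = "date_time" <;> by_cases h2 : key = "location" <;>
    by_cases h3 : key = "next_steps" <;>
    simp_all [bPiece, specInner_false, bBody_eq_spec] <;>
    (have hb : (!(key == "date_time") && !(key == "location")) = true := by simp [h1, h2]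
     rw [hb])

-- ===== VERDICT (by name: the statement is the Claim_ definition above) =====
theorem createHTMLEmailStructure_spec : Claim_equal_createHTMLEmailStructure := by
  intro data _
  show createHTMLEmailStructure data = createHTMLEmailStructure_alt data
  unfold createHTMLEmailStructure createHTMLEmailStructure_alt
  rw [join_nil_flatten]
  dsimp only []
  congr 1
  rw [PySem.List.foldl_append_eq_flatMap]
  have hf : data.flatMap (fun kv =>
      let key := kv.1
      let value := kv.2.toList
      let newValue := aInner key value 0 value []
      (if !(key == "date_time") && !(key == "next_steps") then
        "<p><strong>".toList ++ pyCapitalize key.toList ++ "</strong></p><p>".toList ++ newValue ++ "</p>".toList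
      else
        "<p><strong>".toList ++ pyTitle (PySem.Chars.replace key.toList "_".toList " ".toList) ++ "</strong></p><p>".toList ++ newValue ++ "</p>".toList))
      = data.flatMap bPiece := by
    exact congrArg (fun f => List.flatMap f data) (funext (fun kv => piece_eq kv))
  rw [hf]
  simp [List.flatMap_def]
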